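-- pv_equiv track=rewrite | github.com/iivlx/px-computers | tools/px-assembler/pxAssembler.py | tokenizeOperand
-- ===== SOURCE A (Python) =====
-- def tokenizeOperand(operand):
--     operand = operand.replace('[[', '(').replace(']]', ')')
--     operand += ' '  # force delimiter at end of string
--
--     tokens = []
--     current_token = ""
--
--     for char in operand:
--       # end token
--       if char in "[]():! ":
--           # current token
--           if current_token: tokens.append(current_token)
--           current_token = ""
--           # delimiter token
--           if not char.isspace(): tokens.append(char)
--       # build token
--       else: current_token += char
--
--     return tokens
-- ===== SOURCE B (Python) =====
-- def tokenizeOperand(operand):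
--     operand = operand.replace('[[', '(').replace(']]', ')')
--     tokens = []
--     i, n = 0, len(operand)
--     while i < n:
--         c = operand[i]
--         if c in "[]():!":
--             tokens.append(c)
--             i += 1
--         elif c == ' ':
--             i += 1
--         else:
--             j = i + 1
--             while j < n and operand[j] not in "[]():! ":
--                 j += 1
--             tokens.append(operand[i:j])
--             i = j
--     return tokens
-- ===== Notes on version B (the rewrite author's own statement) =====
-- stated objective: alternative
-- what changed: B drops A's end-of-string sentinel and character-by-character token accumulator and instead scans with an index, emitting each delimiter directly and slicing out each maximal non-delimiter run in one inner step.
import Mathlib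
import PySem

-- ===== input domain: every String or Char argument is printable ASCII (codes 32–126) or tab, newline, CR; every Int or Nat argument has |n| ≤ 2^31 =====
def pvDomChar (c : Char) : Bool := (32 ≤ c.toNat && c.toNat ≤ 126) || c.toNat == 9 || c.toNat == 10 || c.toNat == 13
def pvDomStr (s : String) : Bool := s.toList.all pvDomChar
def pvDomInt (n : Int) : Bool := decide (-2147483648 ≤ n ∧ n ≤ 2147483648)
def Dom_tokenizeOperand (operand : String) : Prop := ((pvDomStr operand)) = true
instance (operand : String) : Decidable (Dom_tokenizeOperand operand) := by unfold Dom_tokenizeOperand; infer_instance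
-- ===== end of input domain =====

-- B replaces A's end-sentinel + char-by-char accumulator fold with an index/span scanner
-- that emits maximal runs in one step (objective: alternative; same O(n) cost).

-- ===== PORT A =====
-- the Python literal "[]():! " as its character sequence ('char in "[]():! "' = membership)
def delimsA : List Char := ['[', ']', '(', ')', ':', '!', ' ']

-- one iteration of A's for-loop: state = (tokens, current_token as its char list)
def stepA (st : List String × List Char) (char : Char) : List String × List Char :=
  if delimsA.contains char then
    ((if st.2 ≠ [] then st.1 ++ [String.mk st.2] else st.1) ++
     (if !(PySem.Chars.isspace char) then [String.mk [char]] else []), [])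
  else (st.1, st.2 ++ [char])

def tokenizeOperand (operand : String) : List String :=
  -- operand.replace('[[','(').replace(']]',')') then operand += ' '
  let cs := (PySem.Str.replace (PySem.Str.replace operand "[[" "(") "]]" ")").toList ++ [' ']
  (cs.foldl stepA ([], [])).1

-- ===== PORT B =====
-- the Python literal "[]():!" as its character sequence
def delimsB : List Char := ['[', ']', '(', ')', ':', '!']

-- B's index loop: at a delimiter emit it, at a space skip, else slice the maximal run
def scanB : List Char → List String
  | [] => []
  | c :: rest =>
    if delimsB.contains c then String.mk [c] :: scanB rest
    else if c = ' ' then scanB rest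
    else
      let run := rest.takeWhile (fun d => !delimsA.contains d)
      String.mk (c :: run) :: scanB (rest.drop run.length)
termination_by cs => cs.length
decreasing_by
  · simp
  · simp
  · simpa using Nat.lt_succ_of_le (Nat.le_trans (List.length_drop_le _ _) (Nat.le_refl _))

def tokenizeOperand_alt (operand : String) : List String :=
  scanB (PySem.Str.replace (PySem.Str.replace operand "[[" "(") "]]" ")").toList

-- ===== PRECONDITION & SPEC =====
def Spec_tokenizeOperand (operand : String) (out : List String) : Prop := out = tokenizeOperand_alt operand
instance (operand : String) (out : List String) : Decidable (Spec_tokenizeOperand operand out) := by unfold Spec_tokenizeOperand; infer_instance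

-- ===== CLAIM (what is proved, stated in full; the proofs are below) =====
def Claim_equal_tokenizeOperand : Prop := ∀ (operand : String), Dom_tokenizeOperand operand → Spec_tokenizeOperand operand (tokenizeOperand operand)

-- ===== LEMMAS AND PROOFS =====

theorem stepA_eq (toks : List String) (cur : List Char) (c : Char) :
    stepA (toks, cur) c = (toks ++ (stepA ([], cur) c).1, (stepA ([], cur) c).2) := by
  by_cases hc : c ∈ delimsA <;> by_cases hcur : cur = [] <;>
    simp [stepA, hc, hcur]

-- A's loop from an arbitrary token accumulator factors through the empty accumulator
theorem foldl_stepA_factor (cs : List Char) :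
    ∀ (toks : List String) (cur : List Char),
      List.foldl stepA (toks, cur) cs =
        (toks ++ (List.foldl stepA ([], cur) cs).1, (List.foldl stepA ([], cur) cs).2) := by
  induction cs with
  | nil => intro toks cur; simp
  | cons c cs ih =>
    intro toks cur
    simp only [List.foldl_cons]
    rw [stepA_eq toks cur c, ih (toks ++ _)]
    conv_rhs =>
      rw [show stepA ([], cur) c = ((stepA ([], cur) c).1, (stepA ([], cur) c).2) from rfl, ih]
    simp

theorem drop_length_takeWhile (p : Char → Bool) (l : List Char) :
    l.drop (l.takeWhile p).length = l.dropWhile p := by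
  induction l with
  | nil => simp
  | cons c cs ih =>
    by_cases h : p c <;> simp [List.takeWhile_cons, List.dropWhile_cons, h, ih]

-- main invariant: A's loop with pending token `run` over cs ++ [' '] produces B's scan
theorem stepA_delim (run : List Char) (c : Char) (hc : delimsA.contains c = true) :
    stepA ([], run) c =
      ((if run = [] then [] else [String.mk run]) ++
        (if PySem.Chars.isspace c then [] else [String.mk [c]]), []) := by
  have hcm : c ∈ delimsA := by simpa using hc
  by_cases hrun : run = [] <;> simp [stepA, hcm, hrun] <;>
    by_cases hs : PySem.Chars.isspace c <;> simp [hs]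

theorem foldl_stepA_fst (cs : List Char) (toks : List String) (cur : List Char) :
    (List.foldl stepA (toks, cur) cs).1 = toks ++ (List.foldl stepA ([], cur) cs).1 := by
  rw [foldl_stepA_factor]

theorem main_inv (cs : List Char) :
    (∀ run : List Char, run ≠ [] →
      (List.foldl stepA ([], run) (cs ++ [' '])).1 =
        String.mk (run ++ cs.takeWhile (fun d => !delimsA.contains d)) ::
          scanB (cs.dropWhile (fun d => !delimsA.contains d))) ∧
    (List.foldl stepA ([], ([] : List Char)) (cs ++ [' '])).1 = scanB cs := by
  induction cs with
  | nil =>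
    constructor
    · intro run hrun
      simp [stepA, delimsA, scanB, hrun, PySem.Chars.isspace]
    · simp [stepA, delimsA, PySem.Chars.isspace, scanB]
  | cons c cs ih =>
    obtain ⟨ih1, ih0⟩ := ih
    by_cases hc : delimsA.contains c = true
    · have hcases : c = '[' ∨ c = ']' ∨ c = '(' ∨ c = ')' ∨ c = ':' ∨ c = '!' ∨ c = ' ' := by
        simpa [delimsA] using hc
      have hspace : PySem.Chars.isspace c = (c == ' ') := by
        rcases hcases with h|h|h|h|h|h|h <;> subst h <;> decide
      have hB : delimsB.contains c = (c != ' ') := by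
        rcases hcases with h|h|h|h|h|h|h <;> subst h <;> decide
      have hcm : c ∈ delimsA := by simpa using hc
      have htake : (c :: cs).takeWhile (fun d => !delimsA.contains d) = [] := by
        simp [List.takeWhile_cons, hcm]
      have hdrop : (c :: cs).dropWhile (fun d => !delimsA.contains d) = c :: cs := by
        simp [List.dropWhile_cons, hcm]
      constructor
      · intro run hrun
        simp only [List.cons_append, List.foldl_cons]
        rw [stepA_delim run c hc, foldl_stepA_fst, ih0, htake, hdrop]
        simp only [if_neg hrun, hspace]
        rw [scanB]
        by_cases hspc : c = ' '
        · subst hspc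
          simp [show (' ' ∉ delimsB) from by decide]
        · have hBm : c ∈ delimsB := by
            rcases hcases with h|h|h|h|h|h|h <;> subst h <;>
              first | decide | exact absurd rfl hspc
          simp [hspc, hBm]
      · simp only [List.cons_append, List.foldl_cons]
        rw [stepA_delim [] c hc, foldl_stepA_fst, ih0]
        simp only [if_pos rfl, hspace]
        rw [scanB]
        by_cases hspc : c = ' '
        · subst hspc
          simp [show (' ' ∉ delimsB) from by decide]
        · have hBm : c ∈ delimsB := by
            rcases hcases with h|h|h|h|h|h|h <;> subst h <;>
              first | decide | exact absurd rfl hspc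
          simp [hspc, hBm]
    · have hcm : c ∉ delimsA := by simpa using hc
      have hc' : delimsA.contains c = false := by simpa using hc
      have hsp : c ≠ ' ' := by intro h; subst h; simp [delimsA] at hc
      have hB : delimsB.contains c = false := by
        simp only [delimsA, delimsB, List.contains_eq_mem, decide_eq_true_eq] at hc ⊢
        simp at hc; simp; tauto
      have htake : (c :: cs).takeWhile (fun d => !delimsA.contains d) =
          c :: cs.takeWhile (fun d => !delimsA.contains d) := by
        simp [List.takeWhile_cons, hcm]
      have hdrop : (c :: cs).dropWhile (fun d => !delimsA.contains d) =
          cs.dropWhile (fun d => !delimsA.contains d) := by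
        simp [List.dropWhile_cons, hcm]
      have hstep : stepA ([], ([] : List Char)) c = ([], [c]) := by simp [stepA, hcm]
      have hstep2 : ∀ run : List Char, stepA ([], run) c = ([], run ++ [c]) := by
        intro run; simp [stepA, hcm]
      constructor
      · intro run hrun
        simp only [List.cons_append, List.foldl_cons]
        rw [hstep2 run, ih1 (run ++ [c]) (by simp), htake, hdrop]
        simp
      · simp only [List.cons_append, List.foldl_cons]
        rw [hstep, ih1 [c] (by simp)]
        rw [scanB]
        have hBm : c ∉ delimsB := by simpa using hB
        simp [hBm, hsp, drop_length_takeWhile]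

-- ===== VERDICT (by name: the statement is the Claim_ definition above) =====
theorem tokenizeOperand_spec : Claim_equal_tokenizeOperand := by
  intro operand _
  unfold Spec_tokenizeOperand tokenizeOperand tokenizeOperand_alt
  exact (main_inv _).2
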